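-- pv_equiv track=rewrite | github.com/Haridev21/railway-route-finder | fare_calculator.py | closest_class
-- ===== SOURCE A (Python) =====
-- _CLASS_ORDER = ['GN', '2S', 'SL', '3E', 'CC', '3A', 'EC', '2A', '1A']
--
-- def closest_class(preferred, classes):
--     """Return closest available class to preferred. Never crashes."""
--     if not classes:
--         return preferred or 'SL'
--     if not preferred:
--         return cheapest_class(classes)
--     if preferred in classes:
--         return preferred
--     if preferred not in _CLASS_ORDER:
--         return cheapest_class(classes)
--     idx = _CLASS_ORDER.index(preferred)
--     for delta in range(1, len(_CLASS_ORDER)):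
--         below = idx - delta
--         above = idx + delta
--         if below >= 0 and _CLASS_ORDER[below] in classes:
--             return _CLASS_ORDER[below]
--         if above < len(_CLASS_ORDER) and _CLASS_ORDER[above] in classes:
--             return _CLASS_ORDER[above]
--     return classes[0]
--
-- def cheapest_class(classes):
--     for c in _CLASS_ORDER:
--         if c in classes: return c
--     return classes[0] if classes else 'SL'
-- ===== SOURCE B (Python) =====
-- _CLASS_ORDER = ['GN', '2S', 'SL', '3E', 'CC', '3A', 'EC', '2A', '1A']
--
-- def closest_class(preferred, classes):
--     """Return closest available class to preferred. Never crashes."""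
--     if not classes:
--         return preferred or 'SL'
--     if not preferred:
--         return _first_in_order(classes)
--     if preferred in classes:
--         return preferred
--     if preferred not in _CLASS_ORDER:
--         return _first_in_order(classes)
--     idx = _CLASS_ORDER.index(preferred)
--     best = None
--     best_key = None
--     for pos, c in enumerate(_CLASS_ORDER):
--         if c in classes:
--             key = (abs(pos - idx), 0 if pos < idx else 1)
--             if best_key is None or key < best_key:
--                 best_key = key
--                 best = c
--     return best if best is not None else classes[0]
--
-- def _first_in_order(classes):
--     return next((c for c in _CLASS_ORDER if c in classes), classes[0])
-- ===== Notes on version B (the rewrite author's own statement) =====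
-- stated objective: simpler
-- what changed: Replaced the expanding bidirectional early-exit search (delta loop probing idx-delta and idx+delta) with a single linear scan over _CLASS_ORDER that selects the available class minimizing the (distance, side) key.
import Mathlib
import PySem

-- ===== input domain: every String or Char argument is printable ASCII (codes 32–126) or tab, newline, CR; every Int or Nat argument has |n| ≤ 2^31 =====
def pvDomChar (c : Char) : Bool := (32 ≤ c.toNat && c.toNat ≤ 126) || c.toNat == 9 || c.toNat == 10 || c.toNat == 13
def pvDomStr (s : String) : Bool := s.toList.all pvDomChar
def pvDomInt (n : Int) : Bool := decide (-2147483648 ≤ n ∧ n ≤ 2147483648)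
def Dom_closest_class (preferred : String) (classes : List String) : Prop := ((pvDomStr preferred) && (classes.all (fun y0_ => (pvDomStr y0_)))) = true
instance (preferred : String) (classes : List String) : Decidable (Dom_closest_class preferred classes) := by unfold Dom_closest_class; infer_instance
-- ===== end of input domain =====

-- B replaces A's expanding bidirectional early-exit search with one linear
-- minimum-by-(distance,side) scan over the class order; objective: simpler.

def pvOrder : List String := ["GN", "2S", "SL", "3E", "CC", "3A", "EC", "2A", "1A"]

-- ===== PORT A =====
-- cheapest_class: first element of _CLASS_ORDER present in classes, else classes[0] / 'SL'
def cheapestA (classes : List String) : String :=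
  match pvOrder.find? (fun c => classes.contains c) with
  | some c => c
  | none => match classes with
            | [] => "SL"
            | c :: _ => c

-- the `for delta in range(1, len(_CLASS_ORDER))` loop with its two early returns;
-- `below >= 0` is `d ≤ idx`; the guarded index accesses are in range, so getD is exact
def searchA (classes : List String) (idx : Nat) : List Nat → Option String
  | [] => none
  | d :: ds =>
    if d ≤ idx && classes.contains (pvOrder.getD (idx - d) "") then
      some (pvOrder.getD (idx - d) "")
    else if idx + d < pvOrder.length && classes.contains (pvOrder.getD (idx + d) "") then
      some (pvOrder.getD (idx + d) "")
    else searchA classes idx ds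

def closest_class (preferred : String) (classes : List String) : String :=
  if classes = [] then (if preferred = "" then "SL" else preferred)
  else if preferred = "" then cheapestA classes
  else if classes.contains preferred then preferred
  else if !(pvOrder.contains preferred) then cheapestA classes
  else
    let idx := pvOrder.idxOf preferred
    match searchA classes idx (List.range' 1 (pvOrder.length - 1)) with
    | some c => c
    | none => classes.headD ""    -- classes[0]; classes is nonempty here

-- ===== PORT B =====
-- _first_in_order: next((c for c in _CLASS_ORDER if c in classes), classes[0])
def firstInOrderB (classes : List String) : String :=
  (pvOrder.find? (fun c => classes.contains c)).getD (classes.headD "")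

-- Python tuple comparison on (distance, side) keys
def keyLt (a b : Nat × Nat) : Bool := a.1 < b.1 || (a.1 == b.1 && a.2 < b.2)

-- the body of B's `for pos, c in enumerate(_CLASS_ORDER)` loop (best/best_key tracked jointly)
def stepB (classes : List String) (idx : Nat)
    (best : Option ((Nat × Nat) × String)) (ci : String × Nat) : Option ((Nat × Nat) × String) :=
  if classes.contains ci.1 then
    let key : Nat × Nat := (((ci.2 : Int) - (idx : Int)).natAbs, if ci.2 < idx then 0 else 1)
    match best with
    | none => some (key, ci.1)
    | some bk => if keyLt key bk.1 then some (key, ci.1) else best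
  else best

def closest_class_alt (preferred : String) (classes : List String) : String :=
  if classes = [] then (if preferred = "" then "SL" else preferred)
  else if preferred = "" then firstInOrderB classes
  else if classes.contains preferred then preferred
  else if !(pvOrder.contains preferred) then firstInOrderB classes
  else
    let idx := pvOrder.idxOf preferred
    match pvOrder.zipIdx.foldl (stepB classes idx) none with
    | some b => b.2
    | none => classes.headD ""    -- classes[0]; classes is nonempty here

-- ===== PRECONDITION & SPEC =====
def Spec_closest_class (preferred : String) (classes : List String) (out : String) : Prop := out = closest_class_alt preferred classes
instance (preferred : String) (classes : List String) (out : String) : Decidable (Spec_closest_class preferred classes out) := by unfold Spec_closest_class; infer_instance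

-- ===== CLAIM (what is proved, stated in full; the proofs are below) =====
def Claim_equal_closest_class : Prop := ∀ (preferred : String) (classes : List String), Dom_closest_class preferred classes → Spec_closest_class preferred classes (closest_class preferred classes)

-- ===== LEMMAS AND PROOFS =====

-- mask abstraction: which of the nine order positions are available
def maskOf (classes : List String) : List Bool := pvOrder.map (fun c => classes.contains c)

lemma mask_getD (classes : List String) (j : Nat) (h : j < 9) :
    (maskOf classes).getD j false = classes.contains (pvOrder.getD j "") := by
  unfold maskOf pvOrder
  interval_cases j <;> rfl

-- A's search, on the mask (positions instead of strings)
def mA (m : List Bool) (idx : Nat) : List Nat → Option Nat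
  | [] => none
  | d :: ds =>
    if d ≤ idx && m.getD (idx - d) false then some (idx - d)
    else if idx + d < 9 && m.getD (idx + d) false then some (idx + d)
    else mA m idx ds

-- B's scan step, on the mask
def stepM (m : List Bool) (idx : Nat)
    (best : Option ((Nat × Nat) × Nat)) (i : Nat) : Option ((Nat × Nat) × Nat) :=
  if m.getD i false then
    let key : Nat × Nat := (((i : Int) - (idx : Int)).natAbs, if i < idx then 0 else 1)
    match best with
    | none => some (key, i)
    | some bk => if keyLt key bk.1 then some (key, i) else best
  else best

def mB (m : List Bool) (idx : Nat) : Option ((Nat × Nat) × Nat) :=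
  (List.range 9).foldl (stepM m idx) none

def liftP (p : (Nat × Nat) × Nat) : (Nat × Nat) × String := (p.1, pvOrder.getD p.2 "")

lemma searchA_eq (classes : List String) (idx : Nat) (hidx : idx ≤ 8) :
    ∀ ds : List Nat, searchA classes idx ds
      = (mA (maskOf classes) idx ds).map (fun i => pvOrder.getD i "") := by
  intro ds
  induction ds with
  | nil => rfl
  | cons d ds ih =>
    simp only [searchA, mA, show pvOrder.length = 9 from rfl,
      mask_getD classes (idx - d) (by omega)]
    by_cases h2 : idx + d < 9
    · rw [mask_getD classes (idx + d) (by omega)]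
      split_ifs <;> simp [ih]
    · simp only [h2, decide_false, Bool.false_and, Bool.and_eq_true, decide_eq_true_eq]
      split_ifs <;> simp [ih]

lemma fold_eq (classes : List String) (idx : Nat) :
    ∀ (l : List (String × Nat)) (acc : Option ((Nat × Nat) × Nat)),
      (∀ p ∈ l, p.1 = pvOrder.getD p.2 "" ∧ p.2 < 9) →
      l.foldl (stepB classes idx) (acc.map liftP)
        = ((l.map Prod.snd).foldl (stepM (maskOf classes) idx) acc).map liftP := by
  intro l
  induction l with
  | nil => intro acc _; rfl
  | cons p l ih =>
    intro acc hl
    obtain ⟨hp1, hp2⟩ := hl p (List.mem_cons_self ..)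
    have hstep : stepB classes idx (acc.map liftP) p = (stepM (maskOf classes) idx acc p.2).map liftP := by
      unfold stepB stepM
      rw [mask_getD classes p.2 hp2, ← hp1]
      cases h : classes.contains p.1 with
      | false => simp
      | true =>
        cases acc with
        | none => simp [liftP, hp1]
        | some bk => by_cases hk : keyLt (((p.2 : Int) - (idx : Int)).natAbs, if p.2 < idx then 0 else 1) bk.1 <;>
            simp [liftP, hp1, hk]
    simp only [List.foldl_cons, List.map_cons, hstep]
    exact ih _ (fun q hq => hl q (List.mem_cons_of_mem _ hq))

-- the finite core: for every index and every availability mask with the preferred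
-- position unavailable, A's bidirectional search returns B's minimum-key position
lemma core (idx : Fin 9) (b0 b1 b2 b3 b4 b5 b6 b7 b8 : Bool)
    (h : [b0,b1,b2,b3,b4,b5,b6,b7,b8].getD idx.val false = false) :
    mA [b0,b1,b2,b3,b4,b5,b6,b7,b8] idx.val [1,2,3,4,5,6,7,8]
      = (mB [b0,b1,b2,b3,b4,b5,b6,b7,b8] idx.val).map Prod.snd := by
  revert h
  revert b0 b1 b2 b3 b4 b5 b6 b7 b8
  revert idx
  decide

lemma cheapest_eq (classes : List String) (h : classes ≠ []) :
    cheapestA classes = firstInOrderB classes := by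
  unfold cheapestA firstInOrderB
  cases hf : pvOrder.find? (fun c => classes.contains c) with
  | some c => rfl
  | none => cases classes with
    | nil => exact absurd rfl h
    | cons c cs => rfl

-- ===== VERDICT (by name: the statement is the Claim_ definition above) =====
theorem closest_class_spec : Claim_equal_closest_class := by
  intro preferred classes _
  unfold Spec_closest_class closest_class closest_class_alt
  by_cases h1 : classes = []
  · simp [h1]
  · by_cases h2 : preferred = ""
    · simp [h1, h2, cheapest_eq classes h1]
    · by_cases h3 : classes.contains preferred
      · have h3' : preferred ∈ classes := by simpa using h3
        simp [h1, h2, h3']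
      · have h3' : preferred ∉ classes := by simpa using h3
        by_cases h4 : pvOrder.contains preferred
        · have hmem : preferred ∈ pvOrder := by simpa using h4
          simp only [h1, h2, h4, if_false, Bool.not_true, Bool.false_eq_true]
          have hlen : List.idxOf preferred pvOrder < pvOrder.length := List.idxOf_lt_length_of_mem hmem
          have hlt : pvOrder.idxOf preferred < 9 := by simpa using hlen
          have hget : pvOrder.getD (pvOrder.idxOf preferred) "" = preferred := by
            simp [List.getD, List.getElem?_eq_getElem hlen, List.getElem_idxOf]
          have hmask : (maskOf classes).getD (pvOrder.idxOf preferred) false = false := by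
            rw [mask_getD classes _ hlt, hget]
            simpa using h3
          have hr : List.range' 1 (pvOrder.length - 1) = [1,2,3,4,5,6,7,8] := rfl
          rw [hr, searchA_eq classes _ (by omega) [1,2,3,4,5,6,7,8]]
          have hz : pvOrder.zipIdx.foldl (stepB classes (pvOrder.idxOf preferred)) none
              = (mB (maskOf classes) (pvOrder.idxOf preferred)).map liftP := by
            have := fold_eq classes (pvOrder.idxOf preferred) pvOrder.zipIdx none (by decide)
            simpa [mB, show pvOrder.zipIdx.map Prod.snd = List.range 9 from rfl] using this
          rw [hz]
          have hmm : maskOf classes = [classes.contains "GN", classes.contains "2S",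
              classes.contains "SL", classes.contains "3E", classes.contains "CC",
              classes.contains "3A", classes.contains "EC", classes.contains "2A",
              classes.contains "1A"] := rfl
          have hcore := core ⟨pvOrder.idxOf preferred, hlt⟩ (classes.contains "GN")
            (classes.contains "2S") (classes.contains "SL") (classes.contains "3E")
            (classes.contains "CC") (classes.contains "3A") (classes.contains "EC")
            (classes.contains "2A") (classes.contains "1A") (by rw [← hmm]; exact hmask)
          rw [← hmm] at hcore
          rw [hcore]
          cases mB (maskOf classes) (pvOrder.idxOf preferred) <;> simp [liftP]
        · have h4' : preferred ∉ pvOrder := by simpa using h4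
          simp [h1, h2, h3', h4', cheapest_eq classes h1]
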